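-- pv_equiv track=rewrite | github.com/fulajtarova/PKS-Computer-and-Communication-Networks | project1/analyze_packets.py | hexa_frame_wrap
-- ===== SOURCE A (Python) =====
-- def hexa_frame_wrap(hexa_frame):
--     formatted_hexa_frame = ""
--     for i in range(0, len(hexa_frame)):
--         if i % 2 == 0 and i > 0 and i % 32 != 0:
--             formatted_hexa_frame += " "
--         if i % 32 == 0 and i > 0:
--             formatted_hexa_frame += "\n"
--         formatted_hexa_frame += hexa_frame[i]
--
--     return formatted_hexa_frame
-- ===== SOURCE B (Python) =====
-- def hexa_frame_wrap(hexa_frame):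
--     pairs = [hexa_frame[i:i + 2] for i in range(0, len(hexa_frame), 2)]
--     lines = [' '.join(pairs[i:i + 16]) for i in range(0, len(pairs), 16)]
--     return '\n'.join(lines)
-- ===== Notes on version B (the rewrite author's own statement) =====
-- stated objective: idiomatic
-- what changed: Replaces the character-by-character scan with i%2/i%32 separator tests by slicing the string into 2-char pairs, grouping 16 pairs per line, and joining pairs with spaces and lines with newlines; str.join also avoids repeated string concatenation.
import Mathlib
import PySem

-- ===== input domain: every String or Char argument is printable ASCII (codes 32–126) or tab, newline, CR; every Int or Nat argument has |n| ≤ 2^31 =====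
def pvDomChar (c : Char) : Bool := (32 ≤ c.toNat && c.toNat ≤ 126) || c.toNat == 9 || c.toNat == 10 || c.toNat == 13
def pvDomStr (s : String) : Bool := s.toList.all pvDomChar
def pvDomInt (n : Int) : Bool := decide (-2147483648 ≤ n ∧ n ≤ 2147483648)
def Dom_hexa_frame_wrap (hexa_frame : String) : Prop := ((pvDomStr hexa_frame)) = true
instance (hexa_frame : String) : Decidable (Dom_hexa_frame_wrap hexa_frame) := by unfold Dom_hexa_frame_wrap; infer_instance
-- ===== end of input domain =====

-- B replaces A's char-by-char scan with i%2/i%32 separator tests by slicing into 2-char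
-- pairs, grouping 16 pairs per line and joining them (idiomatic; measured faster by a constant factor).

-- ===== PORT A =====
-- A scans character indices 0..len-1, prepending ' ' before each even index i>0 with
-- i%32≠0 and '\n' before each positive multiple of 32, then appends hexa_frame[i].
-- hexa_frame[i] is always in range here, so the IndexError default of pyGetD is unreachable.
def hexa_frame_wrap (hexa_frame : String) : String :=
  let cs := hexa_frame.toList
  String.ofList <|
    (PySem.List.pyRange 0 (PySem.Str.len hexa_frame) 1).foldl (fun acc i =>
      let acc := if PySem.Int.mod i 2 == 0 && decide (0 < i) && PySem.Int.mod i 32 != 0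
                 then acc ++ [' '] else acc
      let acc := if PySem.Int.mod i 32 == 0 && decide (0 < i)
                 then acc ++ ['\n'] else acc
      acc ++ [PySem.List.pyGetD cs i ' ']) []

-- ===== PORT B =====
def hexa_frame_wrap_alt (hexa_frame : String) : String :=
  let pairs := (PySem.List.pyRange 0 (PySem.Str.len hexa_frame) 2).map
    (fun i => PySem.Str.slice hexa_frame (some i) (some (i + 2)))
  let lines := (PySem.List.pyRange 0 (PySem.List.len pairs) 16).map
    (fun i => PySem.Str.join " " (PySem.List.slice pairs (some i) (some (i + 16))))
  PySem.Str.join "\n" lines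

-- ===== PRECONDITION & SPEC =====
def Spec_hexa_frame_wrap (hexa_frame : String) (out : String) : Prop := out = hexa_frame_wrap_alt hexa_frame
instance (hexa_frame : String) (out : String) : Decidable (Spec_hexa_frame_wrap hexa_frame out) := by unfold Spec_hexa_frame_wrap; infer_instance

-- ===== CLAIM (what is proved, stated in full; the proofs are below) =====
def Claim_equal_hexa_frame_wrap : Prop := ∀ (hexa_frame : String), Dom_hexa_frame_wrap hexa_frame → Spec_hexa_frame_wrap hexa_frame (hexa_frame_wrap hexa_frame)

-- ===== LEMMAS AND PROOFS =====

def pvChunks {α : Type} (st : Nat) : List α → List (List α)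
  | [] => []
  | x :: t => (x :: t).take st :: pvChunks st (t.drop (st - 1))
termination_by xs => xs.length
decreasing_by simp only [List.length_cons]; have := List.length_drop (i := st - 1) (l := t); omega

theorem pvChunks_ne_nil_unfold {α : Type} (st : Nat) (hst : 0 < st) (xs : List α) (h : xs ≠ []) :
    pvChunks st xs = xs.take st :: pvChunks st (xs.drop st) := by
  match xs with
  | [] => exact absurd rfl h
  | x :: t =>
    simp only [pvChunks]
    rcases st with _ | st'
    · omega
    · simp

theorem pvChunks_eq_map_range {α : Type} (st : Nat) (hst : 0 < st) (xs : List α) :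
    pvChunks st xs =
      (List.range ((xs.length + st - 1) / st)).map (fun k => (xs.drop (st * k)).take st) := by
  induction hn : xs.length using Nat.strong_induction_on generalizing xs with
  | _ n ih =>
  subst hn
  rcases xs with _ | ⟨x, t⟩
  · simp [pvChunks, Nat.div_eq_of_lt (by omega : st - 1 < st)]
  · have hL : 1 ≤ (x :: t).length := by simp
    have hm : ((x :: t).length + st - 1) / st = ((x :: t).length - 1) / st + 1 := by
      rw [show (x :: t).length + st - 1 = ((x :: t).length - 1) + st by omega,
        Nat.add_div_right _ hst]
    rw [pvChunks_ne_nil_unfold st hst _ (by simp), hm, List.range_succ_eq_map, List.map_cons,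
      List.map_map]
    simp only [Nat.mul_zero, List.drop_zero]
    congr 1
    have hdlen : ((x :: t).drop st).length = (x :: t).length - st := List.length_drop
    rw [ih ((x :: t).drop st).length (by rw [hdlen]; simp; omega) _ rfl]
    have hcnt : (((x :: t).drop st).length + st - 1) / st = ((x :: t).length - 1) / st := by
      rw [hdlen]
      by_cases h : (x :: t).length ≤ st
      · rw [Nat.div_eq_of_lt (by omega), Nat.div_eq_of_lt (by omega)]
      · rw [show (x :: t).length - st + st - 1 = ((x :: t).length - st - 1) + st by omega,
          Nat.add_div_right _ hst,
          show (x :: t).length - 1 = ((x :: t).length - st - 1) + st by omega,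
          Nat.add_div_right _ hst]
    rw [hcnt]
    apply List.map_congr_left
    intro k _
    simp only [Function.comp_apply, List.drop_drop]
    rw [show st * (Nat.succ k) = st + st * k by rw [Nat.mul_succ]; omega]

theorem pvChunks_take {α : Type} (st : Nat) (hst : 0 < st) (m : Nat) :
    ∀ xs : List α, (pvChunks st xs).take m = pvChunks st (xs.take (st * m)) := by
  induction m with
  | zero => intro xs; simp [pvChunks]
  | succ m ih =>
    intro xs
    rcases xs with _ | ⟨x, t⟩
    · simp [pvChunks]
    · rw [pvChunks_ne_nil_unfold st hst _ (by simp), List.take_succ_cons, ih,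
        pvChunks_ne_nil_unfold st hst ((x :: t).take (st * (m + 1)))
          (by simp; omega),
        List.take_take, Nat.min_eq_left (by rw [Nat.mul_succ]; omega), List.drop_take,
        show st * (m + 1) - st = st * m by rw [Nat.mul_succ]; omega]

theorem pvChunks_drop {α : Type} (st : Nat) (hst : 0 < st) (m : Nat) :
    ∀ xs : List α, (pvChunks st xs).drop m = pvChunks st (xs.drop (st * m)) := by
  induction m with
  | zero => intro xs; simp
  | succ m ih =>
    intro xs
    rcases xs with _ | ⟨x, t⟩
    · simp [pvChunks]
    · rw [pvChunks_ne_nil_unfold st hst _ (by simp), List.drop_succ_cons, ih, List.drop_drop,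
        show st + st * m = st * (m + 1) by rw [Nat.mul_succ]; omega]

def pvRender (cs : List Char) : List Char :=
  if cs = [] then [] else
    PySem.Chars.join [' '] (pvChunks 2 (cs.take 32)) ++
      (if cs.length ≤ 32 then [] else '\n' :: pvRender (cs.drop 32))
termination_by cs.length
decreasing_by have := List.length_drop (i := 32) (l := cs); simp_all; omega

def pvEmit (i : Nat) : List Char → List Char
  | [] => []
  | c :: t =>
      (if i % 2 == 0 && decide (0 < i) && i % 32 != 0 then [' '] else []) ++
      (if i % 32 == 0 && decide (0 < i) then ['\n'] else []) ++
      c :: pvEmit (i + 1) t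

def pvMid : Nat → List Char → List Char
  | _, [] => []
  | p, c :: r =>
      if p = 32 then '\n' :: c :: pvMid 1 r
      else (if p % 2 == 0 then [' '] else []) ++ c :: pvMid (p + 1) r

def pvOddR : List Char → List Char
  | [] => []
  | [d] => [d]
  | d :: e :: w => d :: ' ' :: e :: pvOddR w

theorem pvEmit_shift (cs : List Char) : ∀ i, 1 ≤ i → pvEmit (i + 32) cs = pvEmit i cs := by
  induction cs with
  | nil => intro i _; rfl
  | cons c t ih =>
    intro i hi
    rw [pvEmit, pvEmit]
    have h2 : (i + 32) % 2 = i % 2 := by omega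
    have h32 : (i + 32) % 32 = i % 32 := by omega
    have ha : decide (0 < i + 32) = decide (0 < i) := by simp; omega
    rw [h2, h32, ha, show i + 32 + 1 = (i + 1) + 32 by omega, ih (i + 1) (by omega)]

theorem pvEmit_eq_mid (cs : List Char) : ∀ p, 1 ≤ p → p ≤ 32 → pvEmit p cs = pvMid p cs := by
  induction cs with
  | nil => intro p _ _; rfl
  | cons c t ih =>
    intro p h1 h32
    by_cases hp : p = 32
    · subst hp
      rw [pvEmit, pvMid]
      rw [show 32 + 1 = 1 + 32 from rfl, pvEmit_shift t 1 le_rfl, ih 1 (by omega) (by omega)]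
      norm_num
    · have e32 : p % 32 = p := Nat.mod_eq_of_lt (by omega)
      rw [pvEmit, pvMid, ih (p + 1) (by omega) (by omega)]
      simp [hp, e32, show 0 < p by omega, show p ≠ 0 by omega]

theorem pvMid_odd (n : Nat) : ∀ m t, m + n = 15 →
    pvMid (2 * m + 1) t =
      pvOddR (t.take (31 - 2 * m)) ++
        (match t.drop (31 - 2 * m) with
         | [] => []
         | c :: r => '\n' :: c :: pvMid 1 r) := by
  induction n with
  | zero =>
    intro m t hm
    have hm15 : m = 15 := by omega
    subst hm15
    rcases t with _ | ⟨d, r⟩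
    · rfl
    · rcases r with _ | ⟨e, r'⟩ <;> simp [pvMid, pvOddR]
  | succ n ihn =>
    intro m t hm
    have hj : 31 - 2 * m = (29 - 2 * m) + 2 := by omega
    rcases t with _ | ⟨d, r⟩
    · simp [pvMid, pvOddR]
    · rcases r with _ | ⟨e, r'⟩
      · rw [pvMid, if_neg (show ¬(2 * m + 1 = 32) by omega),
          show (2 * m + 1) % 2 = 1 by omega, hj]
        simp [pvOddR, pvMid]
      · rw [pvMid, if_neg (show ¬(2 * m + 1 = 32) by omega),
          show (2 * m + 1) % 2 = 1 by omega,
          pvMid, if_neg (show ¬(2 * m + 1 + 1 = 32) by omega),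
          show (2 * m + 1 + 1) % 2 = 0 by omega,
          show 2 * m + 1 + 1 + 1 = 2 * (m + 1) + 1 by omega, ihn (m + 1) r' (by omega), hj]
        simp only [List.take_succ_cons, List.drop_succ_cons, pvOddR,
          show 31 - 2 * (m + 1) = 29 - 2 * m by omega]
        simp

theorem pvJoin_pairs (u : List Char) : ∀ c,
    PySem.Chars.join [' '] (pvChunks 2 (c :: u)) = c :: pvOddR u := by
  induction u using pvOddR.induct with
  | case1 => intro c; simp [pvChunks, pvOddR, PySem.Chars.join_singleton]
  | case2 d => intro c; simp [pvChunks, pvOddR, PySem.Chars.join_singleton]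
  | case3 d e w ih =>
    intro c
    have h1 : pvChunks 2 (c :: d :: e :: w) = [c, d] :: pvChunks 2 (e :: w) := by
      simp [pvChunks]
    have h2 : pvChunks 2 (e :: w) = (e :: w).take 2 :: pvChunks 2 ((e :: w).drop 2) := by
      simp [pvChunks]
    rw [h1, h2, PySem.Chars.join_cons_cons, ← h2, ih e]
    simp [pvOddR]

theorem pvEmit_zero_eq_render (cs : List Char) : pvEmit 0 cs = pvRender cs := by
  induction hn : cs.length using Nat.strong_induction_on generalizing cs with
  | _ n ih =>
  subst hn
  rcases cs with _ | ⟨c, t⟩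
  · simp [pvEmit, pvRender]
  · rw [pvEmit, pvEmit_eq_mid t 1 le_rfl (by omega),
      show (1 : Nat) = 2 * 0 + 1 from rfl, pvMid_odd 15 0 t rfl]
    simp only [decide_eq_false (show ¬ (0 < 0) by omega), Bool.and_false, Bool.false_and,
      Bool.false_eq_true, if_false, List.nil_append]
    rw [pvRender]
    simp only [show ¬(c :: t) = [] by simp, if_false, List.take_succ_cons, List.length_cons,
      List.drop_succ_cons, Nat.mul_zero, Nat.sub_zero]
    rw [pvJoin_pairs (t.take 31) c]
    by_cases hlen : t.length ≤ 31
    · rw [if_pos (show t.length + 1 ≤ 32 by omega), List.drop_eq_nil_of_le (show t.length ≤ 31 from hlen)]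
      simp
    · rw [if_neg (show ¬ t.length + 1 ≤ 32 by omega)]
      rcases hd : t.drop 31 with _ | ⟨d, r⟩
      · exact absurd (List.drop_eq_nil_iff.mp hd) (by omega)
      · have hlen2 : (d :: r).length < (c :: t).length := by
          have := congrArg List.length hd
          rw [List.length_drop] at this
          simp only [List.length_cons] at *
          omega
        rw [← ih (d :: r).length (by simpa using hlen2) (d :: r) rfl, pvEmit,
          pvEmit_eq_mid r 1 le_rfl (by omega)]
        simp only [decide_eq_false (show ¬ (0 < 0) by omega), Bool.and_false, Bool.false_and,
          Bool.false_eq_true, if_false, List.nil_append]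
        simp

theorem pvB_eq_render (cs : List Char) :
    PySem.Chars.join ['\n']
        ((pvChunks 16 (pvChunks 2 cs)).map (fun row => PySem.Chars.join [' '] row)) =
      pvRender cs := by
  induction hn : cs.length using Nat.strong_induction_on generalizing cs with
  | _ n ih =>
  subst hn
  rcases cs with _ | ⟨c, t⟩
  · simp [pvChunks, pvRender, PySem.Chars.join_nil]
  · have hP : pvChunks 2 (c :: t) ≠ [] := by
      rw [pvChunks_ne_nil_unfold 2 (by omega) _ (by simp)]; simp
    rw [pvChunks_ne_nil_unfold 16 (by omega) _ hP,
      pvChunks_take 2 (by omega) 16, pvChunks_drop 2 (by omega) 16, List.map_cons]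
    rw [pvRender]
    simp only [show ¬(c :: t) = [] by simp, if_false]
    by_cases hlen : (c :: t).length ≤ 32
    · have hnil : (c :: t).drop (2 * 16) = [] := List.drop_eq_nil_of_le (by simpa using hlen)
      rw [hnil, if_pos hlen]
      simp [pvChunks, PySem.Chars.join_singleton]
    · rcases hd : (c :: t).drop (2 * 16) with _ | ⟨d, r⟩
      · exact absurd (List.drop_eq_nil_iff.mp hd) (by simp at hlen ⊢; omega)
      · rw [if_neg hlen]
        have hQ : pvChunks 2 (d :: r) ≠ [] := by
          rw [pvChunks_ne_nil_unfold 2 (by omega) _ (by simp)]; simp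
        have hlt : (d :: r).length < (c :: t).length := by
          have := congrArg List.length hd
          rw [List.length_drop] at this
          simp only [List.length_cons] at *
          omega
        have hrec := ih (d :: r).length (by simpa using hlt) (d :: r) rfl
        rcases hc16 : pvChunks 16 (pvChunks 2 (d :: r)) with _ | ⟨y, ys⟩
        · rw [pvChunks_ne_nil_unfold 16 (by omega) _ hQ] at hc16
          exact absurd hc16 (by simp)
        · rw [List.map_cons, PySem.Chars.join_cons_cons, ← List.map_cons, ← hc16, hrec]
          simp

def pvGNat (cs : List Char) (k : Nat) : List Char :=
  (if k % 2 == 0 && decide (0 < k) && k % 32 != 0 then [' '] else []) ++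
  (if k % 32 == 0 && decide (0 < k) then ['\n'] else []) ++
  [cs.getD k ' ']

theorem pvFlat_emit (full : List Char) : ∀ n a, a + n = full.length →
    (List.range' a n).flatMap (pvGNat full) = pvEmit a (full.drop a) := by
  intro n
  induction n with
  | zero =>
    intro a ha
    rw [List.range'_zero, List.drop_eq_nil_of_le (by omega)]
    rfl
  | succ n ihn =>
    intro a ha
    have hlt : a < full.length := by omega
    rw [List.range'_succ, List.flatMap_cons, List.drop_eq_getElem_cons hlt, pvEmit,
      ihn (a + 1) (by omega)]
    unfold pvGNat
    rw [List.getD_eq_getElem full ' ' hlt]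
    simp [List.append_assoc]

theorem pvA_toList (s : String) : (hexa_frame_wrap s).toList = pvEmit 0 s.toList := by
  unfold hexa_frame_wrap
  rw [String.toList_ofList]
  rw [show PySem.Str.len s = ((s.toList.length : Nat) : Int) by simp [pysem],
    PySem.List.pyRange_one, List.foldl_map]
  rw [PySem.List.foldl_congr_mem _ _
    (fun acc (k : Nat) => acc ++ pvGNat s.toList k) _ ?hcong]
  case hcong =>
    intro acc k _
    simp only [zero_add]
    have e2 : PySem.Int.mod (k : Int) 2 = ((k % 2 : Nat) : Int) := by
      exact_mod_cast PySem.Int.mod_natCast k 2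
    have e32 : PySem.Int.mod (k : Int) 32 = ((k % 32 : Nat) : Int) := by
      exact_mod_cast PySem.Int.mod_natCast k 32
    rw [e2, e32, PySem.List.pyGetD_natCast]
    unfold pvGNat
    have b2 : (((k % 2 : Nat) : Int) == 0) = (k % 2 == 0) := by
      rw [Bool.eq_iff_iff]; simp only [beq_iff_eq]; omega
    have b32e : (((k % 32 : Nat) : Int) == 0) = (k % 32 == 0) := by
      rw [Bool.eq_iff_iff]; simp only [beq_iff_eq]; omega
    have b32n : (((k % 32 : Nat) : Int) != 0) = (k % 32 != 0) := by
      rw [Bool.eq_iff_iff]; simp only [bne_iff_ne, ne_eq]; omega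
    have bd : (decide ((0 : Int) < (k : Int))) = decide (0 < k) := by simp
    rw [b2, b32e, b32n, bd]
    split_ifs <;> simp
  rw [show ((s.toList.length : Int) - 0).toNat = s.toList.length by omega,
    PySem.List.foldl_append_eq_flatMap, List.range_eq_range',
    pvFlat_emit s.toList s.toList.length 0 (by omega)]
  simp

set_option maxHeartbeats 2000000 in
theorem pvAlt_toList (s : String) :
    (hexa_frame_wrap_alt s).toList =
      PySem.Chars.join ['\n']
        ((pvChunks 16 (pvChunks 2 s.toList)).map (fun row => PySem.Chars.join [' '] row)) := by
  unfold hexa_frame_wrap_alt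
  have hlenS : PySem.Str.len s = ((s.toList.length : Nat) : Int) := by simp [pysem]
  rw [hlenS, PySem.List.pyRange_of_pos 0 _ (by omega : (0:Int) < 2)]
  have hM : (if (0:Int) < (s.toList.length : Int)
        then (((s.toList.length : Int) - 0 + 2 - 1) / 2).toNat else 0)
      = (s.toList.length + 2 - 1) / 2 := by split_ifs <;> omega
  rw [hM, List.map_map]
  set M := (s.toList.length + 2 - 1) / 2 with hMdef
  set pairs := (List.range M).map
    ((fun i => PySem.Str.slice s (some i) (some (i + 2))) ∘ (fun k : Nat => 0 + 2 * (k : Int)))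
    with hpairsdef
  have hpairs : pairs.map String.toList = pvChunks 2 s.toList := by
    rw [hpairsdef, List.map_map, pvChunks_eq_map_range 2 (by omega)]
    apply List.map_congr_left
    intro k _
    simp only [Function.comp_apply, PySem.Str.toList_slice, PySem.Chars.slice_eq_listSlice]
    rw [show (0:Int) + 2 * (k : Int) = ((2 * k : Nat) : Int) by push_cast; ring,
      show ((2 * k : Nat) : Int) + 2 = ((2 * k : Nat) : Int) + ((2 : Nat) : Int) by norm_num,
      PySem.List.slice_natCast_add]
  have hplen : PySem.List.len pairs = ((M : Nat) : Int) := by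
    simp [pysem, hpairsdef]
  dsimp only
  rw [hplen, PySem.List.pyRange_of_pos 0 _ (by omega : (0:Int) < 16)]
  have hM2 : (if (0:Int) < (M : Int) then (((M : Int) - 0 + 16 - 1) / 16).toNat else 0)
      = (M + 16 - 1) / 16 := by split_ifs <;> omega
  rw [hM2, List.map_map, PySem.Str.toList_join, List.map_map]
  have hql : (pvChunks 2 s.toList).length = M := by
    rw [pvChunks_eq_map_range 2 (by omega)]; simp [hMdef]
  rw [pvChunks_eq_map_range 16 (by omega) (pvChunks 2 s.toList), hql, List.map_map]
  rw [show ("\n" : String).toList = ['\n'] from rfl]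
  congr 1
  apply List.map_congr_left
  intro j _
  simp only [Function.comp_apply, PySem.Str.toList_join]
  rw [show (" " : String).toList = [' '] from rfl]
  congr 1
  rw [show (0:Int) + 16 * (j : Int) = ((16 * j : Nat) : Int) by push_cast; ring,
    show ((16 * j : Nat) : Int) + 16 = ((16 * j : Nat) : Int) + ((16 : Nat) : Int) by norm_num,
    PySem.List.slice_natCast_add, List.map_take, List.map_drop, hpairs]

-- ===== VERDICT (by name: the statement is the Claim_ definition above) =====
theorem hexa_frame_wrap_spec : Claim_equal_hexa_frame_wrap := by
  intro s _
  unfold Spec_hexa_frame_wrap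
  apply String.toList_inj.mp
  rw [pvA_toList, pvAlt_toList, pvB_eq_render, pvEmit_zero_eq_render]
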